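-- pv_equiv track=rewrite | github.com/tiangolo/pydantic-sqlalchemy | pydantic_sqlalchemy/module_path_typ.py | get_child_modules_path
-- ===== SOURCE A (Python) =====
-- from typing import NewType, Type, List
--
-- ModulePathType = NewType('ModulePathType', str)
--
-- def get_child_modules_path(module_path: ModulePathType):
--     to_return: List[ModulePathType] = []
--     splitted = module_path.split('.')
--     for i in splitted:
--         if len(to_return) == 0:
--             to_return.append(ModulePathType(i))
--         else:
--             last = to_return[-1]
--             to_return.append(ModulePathType(f"{last}.{i}"))
--     return to_return
-- ===== SOURCE B (Python) =====
-- from typing import NewType, Type, List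
--
-- ModulePathType = NewType('ModulePathType', str)
--
-- def get_child_modules_path(module_path: ModulePathType):
--     parts = module_path.split('.')
--     return [ModulePathType('.'.join(parts[:i + 1])) for i in range(len(parts))]
-- ===== Notes on version B (the rewrite author's own statement) =====
-- stated objective: simpler
-- what changed: B drops A's incremental last-element accumulator and instead computes each prefix independently as a dot-join of a growing slice of the split parts, a one-line comprehension over the index range.
import Mathlib
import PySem

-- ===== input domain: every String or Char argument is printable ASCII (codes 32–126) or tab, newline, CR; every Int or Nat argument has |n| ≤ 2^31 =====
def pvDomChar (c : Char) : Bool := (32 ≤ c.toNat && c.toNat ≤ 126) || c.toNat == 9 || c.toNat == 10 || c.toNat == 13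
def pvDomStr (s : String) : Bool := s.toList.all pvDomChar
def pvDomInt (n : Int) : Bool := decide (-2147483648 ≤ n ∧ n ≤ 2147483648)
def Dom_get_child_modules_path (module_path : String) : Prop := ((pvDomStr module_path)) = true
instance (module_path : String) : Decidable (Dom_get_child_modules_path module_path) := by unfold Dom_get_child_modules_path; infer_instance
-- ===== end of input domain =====

-- B replaces A's running-last-prefix accumulator by independent join-of-slice prefixes (simpler decomposition, not faster).

-- ===== PORT A =====
def get_child_modules_path (module_path : String) : List String :=
  let splitted := PySem.Chars.splitOn module_path.toList ['.']
  (splitted.foldl (fun to_return i =>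
    if to_return.length == 0 then to_return ++ [i]
    else to_return ++ [((PySem.List.pyGet? to_return (-1)).getD []) ++ '.' :: i]) []).map String.mk

-- ===== PORT B =====
def get_child_modules_path_alt (module_path : String) : List String :=
  let parts := PySem.Chars.splitOn module_path.toList ['.']
  (PySem.List.pyRange 0 parts.length 1).map
    (fun i => String.mk (PySem.Chars.join ['.'] (PySem.List.slice parts none (some (i + 1)))))

-- ===== PRECONDITION & SPEC =====
def Spec_get_child_modules_path (module_path : String) (out : List String) : Prop := out = get_child_modules_path_alt module_path
instance (module_path : String) (out : List String) : Decidable (Spec_get_child_modules_path module_path out) := by unfold Spec_get_child_modules_path; infer_instance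

-- ===== CLAIM (what is proved, stated in full; the proofs are below) =====
def Claim_equal_get_child_modules_path : Prop := ∀ (module_path : String), Dom_get_child_modules_path module_path → Spec_get_child_modules_path module_path (get_child_modules_path module_path)

-- ===== LEMMAS AND PROOFS =====

-- running tail of A's loop: successive prefixes extending `last`
def pvTailJoins (last : List Char) : List (List Char) → List (List Char)
  | [] => []
  | i :: rest => (last ++ '.' :: i) :: pvTailJoins (last ++ '.' :: i) rest

theorem pv_join_snoc (pre : List (List Char)) (i : List Char) (h : pre ≠ []) :
    PySem.Chars.join ['.'] (pre ++ [i]) = PySem.Chars.join ['.'] pre ++ '.' :: i := by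
  induction pre with
  | nil => exact absurd rfl h
  | cons q qs ih =>
    cases qs with
    | nil => simp [PySem.Chars.join_cons_cons, PySem.Chars.join_singleton]
    | cons q' qs' =>
      rw [show (q :: q' :: qs') ++ [i] = q :: (q' :: (qs' ++ [i])) by simp,
          PySem.Chars.join_cons_cons,
          show q' :: (qs' ++ [i]) = (q' :: qs') ++ [i] by simp,
          ih (by simp), PySem.Chars.join_cons_cons]
      simp

theorem pv_foldl_tail (rest : List (List Char)) :
    ∀ (acc : List (List Char)) (last : List Char), acc.getLast? = some last →
    rest.foldl (fun to_return i =>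
      if to_return.length == 0 then to_return ++ [i]
      else to_return ++ [((PySem.List.pyGet? to_return (-1)).getD []) ++ '.' :: i]) acc
    = acc ++ pvTailJoins last rest := by
  induction rest with
  | nil => intro acc last _; simp [pvTailJoins]
  | cons i rest ih =>
    intro acc last hlast
    have hne : acc ≠ [] := by
      intro h; rw [h] at hlast; simp at hlast
    have hlen : (acc.length == 0) = false := by
      simp [List.length_eq_zero_iff, hne]
    simp only [List.foldl_cons]
    have h2 : (if (acc.length == 0) = true then acc ++ [i]
        else acc ++ [(PySem.List.pyGet? acc (-1)).getD [] ++ '.' :: i])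
        = acc ++ [last ++ '.' :: i] := by
      rw [hlen, PySem.List.pyGet?_neg_one, hlast]
      simp
    rw [h2, ih (acc ++ [last ++ '.' :: i]) (last ++ '.' :: i) (by simp)]
    simp [pvTailJoins]

theorem pv_map_tail (rest : List (List Char)) :
    ∀ (pre : List (List Char)), pre ≠ [] →
    (List.range rest.length).map
      (fun k => PySem.Chars.join ['.'] (pre ++ rest.take (k + 1)))
    = pvTailJoins (PySem.Chars.join ['.'] pre) rest := by
  induction rest with
  | nil => intro pre _; simp [pvTailJoins]
  | cons i rest ih =>
    intro pre hpre
    rw [List.length_cons, List.range_succ_eq_map]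
    simp only [List.map_cons, List.map_map, pvTailJoins]
    congr 1
    · rw [show List.take (0 + 1) (i :: rest) = [i] by simp]
      exact pv_join_snoc pre i hpre
    · rw [← pv_join_snoc pre i hpre, ← ih (pre ++ [i]) (by simp)]
      apply List.map_congr_left
      intro k _
      simp [Nat.succ_eq_add_one, List.take_succ_cons]

theorem pv_core (parts : List (List Char)) :
    parts.foldl (fun to_return i =>
      if to_return.length == 0 then to_return ++ [i]
      else to_return ++ [((PySem.List.pyGet? to_return (-1)).getD []) ++ '.' :: i]) []
    = (List.range parts.length).map
        (fun k => PySem.Chars.join ['.'] (parts.take (k + 1))) := by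
  cases parts with
  | nil => simp
  | cons p ps =>
    simp only [List.foldl_cons]
    have hstep : (if ([] : List (List Char)).length == 0 then ([] : List (List Char)) ++ [p]
        else [] ++ [((PySem.List.pyGet? ([] : List (List Char)) (-1)).getD []) ++ '.' :: p]) = [p] := by
      simp
    rw [hstep, pv_foldl_tail ps [p] p (by simp)]
    rw [List.length_cons, List.range_succ_eq_map]
    simp only [List.map_cons, List.map_map]
    rw [show ([p] ++ pvTailJoins p ps) = p :: pvTailJoins p ps by simp]
    congr 1
    · simp [PySem.Chars.join_singleton]
    · have hmt := pv_map_tail ps [p] (by simp)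
      rw [PySem.Chars.join_singleton] at hmt
      rw [← hmt]
      apply List.map_congr_left
      intro k _
      simp [Nat.succ_eq_add_one, List.take_succ_cons]

-- ===== VERDICT (by name: the statement is the Claim_ definition above) =====
theorem get_child_modules_path_spec : Claim_equal_get_child_modules_path := by
  intro s _
  unfold Spec_get_child_modules_path get_child_modules_path get_child_modules_path_alt
  simp only [PySem.List.pyRange_one, List.map_map]
  rw [pv_core]
  simp only [List.map_map]
  apply List.map_congr_left
  intro k _
  have h1 : (0 : Int) ≤ (0 : Int) + (k : Int) + 1 := by omega
  simp only [Function.comp]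
  rw [PySem.List.slice_to _ h1]
  have h2 : ((0 : Int) + (k : Int) + 1).toNat = k + 1 := by omega
  rw [h2]
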